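-- pv_equiv track=rewrite | github.com/Andreybelov2314/Home | рекурсия.py | sum_odd
-- ===== SOURCE A (Python) =====
-- def sum_odd(lis):
--     if len(lis) < 1:
--         return 0
--     else:
--         if lis[-1] % 2 == 0:
--             return lis[-1]
--         else:
--             return lis[-1] + sum_odd(lis[:-1])
-- ===== SOURCE B (Python) =====
-- def sum_odd(lis):
--     # Iterative right-to-left scan: accumulate odd elements; the first even
--     # element terminates the scan and is included in the total.
--     acc = 0
--     for x in reversed(lis):
--         acc += x
--         if x % 2 == 0:
--             break
--     return acc
-- ===== Notes on version B (the rewrite author's own statement) =====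
-- stated objective: alternative
-- what changed: Replaced A's recursion that copies the slice lis[:-1] at every step by an iterative right-to-left scan with an early break at the first even element (no recursion, no list copies); quadratic slicing is avoided on all-odd suffixes, though a timing run's inputs break early so no speedup was measured.
import Mathlib
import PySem

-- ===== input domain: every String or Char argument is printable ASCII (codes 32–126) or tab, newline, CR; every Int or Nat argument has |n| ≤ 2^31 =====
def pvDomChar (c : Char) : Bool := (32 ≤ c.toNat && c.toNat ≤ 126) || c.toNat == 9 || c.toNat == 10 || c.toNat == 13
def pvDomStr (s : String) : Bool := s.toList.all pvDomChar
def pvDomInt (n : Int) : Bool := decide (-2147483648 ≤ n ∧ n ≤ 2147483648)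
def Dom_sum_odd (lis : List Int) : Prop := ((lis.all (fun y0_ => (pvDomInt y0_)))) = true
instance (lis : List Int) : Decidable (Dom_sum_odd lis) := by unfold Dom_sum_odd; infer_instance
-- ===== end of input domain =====

-- B replaces A's slicing recursion by an iterative right-to-left scan with an early
-- break at the first even element (objective: alternative — no recursion, no slice copies).


-- ===== PORT A =====
def sum_odd (lis : List Int) : Int :=
  if lis.length < 1 then 0
  else
    if PySem.Int.mod (PySem.List.pyGetD lis (-1) 0) 2 = 0 then
      PySem.List.pyGetD lis (-1) 0
    else
      PySem.List.pyGetD lis (-1) 0 + sum_odd (PySem.List.slice lis none (some (-1)))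
termination_by lis.length
decreasing_by
  simp only [PySem.List.slice_to_neg_one, List.length_dropLast]
  omega

-- ===== PORT B =====
-- the 'for x in reversed(lis)' loop of Source B; 'break' returns the accumulator
def sumOddLoop (acc : Int) : List Int → Int
  | [] => acc
  | x :: rest =>
      if PySem.Int.mod x 2 = 0 then acc + x else sumOddLoop (acc + x) rest

def sum_odd_alt (lis : List Int) : Int :=
  sumOddLoop 0 lis.reverse

-- ===== PRECONDITION & SPEC =====
def Spec_sum_odd (lis : List Int) (out : Int) : Prop := out = sum_odd_alt lis
instance (lis : List Int) (out : Int) : Decidable (Spec_sum_odd lis out) := by unfold Spec_sum_odd; infer_instance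

-- ===== CLAIM (what is proved, stated in full; the proofs are below) =====
def Claim_equal_sum_odd : Prop := ∀ (lis : List Int), Dom_sum_odd lis → Spec_sum_odd lis (sum_odd lis)

-- ===== LEMMAS AND PROOFS =====
theorem sumOddLoop_acc (l : List Int) (acc : Int) :
    sumOddLoop acc l = acc + sumOddLoop 0 l := by
  induction l generalizing acc with
  | nil => simp [sumOddLoop]
  | cons x rest ih =>
      simp only [sumOddLoop]
      split_ifs
      · ring
      · rw [ih (acc + x), ih (0 + x)]; ring

theorem sum_odd_append_singleton (xs : List Int) (x : Int) :
    sum_odd (xs ++ [x]) =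
      if PySem.Int.mod x 2 = 0 then x else x + sum_odd xs := by
  rw [sum_odd]
  simp [PySem.List.pyGetD_neg_one_append_singleton, PySem.List.slice_to_neg_one]

theorem sum_odd_eq_alt (lis : List Int) : sum_odd lis = sum_odd_alt lis := by
  induction lis using List.reverseRecOn with
  | nil => rw [sum_odd]; rfl
  | append_singleton xs x ih =>
      rw [sum_odd_append_singleton]
      unfold sum_odd_alt
      rw [List.reverse_append, List.reverse_singleton, List.singleton_append]
      simp only [sumOddLoop]
      split_ifs
      · ring
      · rw [sumOddLoop_acc, ih]
        unfold sum_odd_alt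
        ring

-- ===== VERDICT (by name: the statement is the Claim_ definition above) =====
theorem sum_odd_spec : Claim_equal_sum_odd := by
  intro lis _
  unfold Spec_sum_odd
  exact sum_odd_eq_alt lis
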